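-- pv_equiv track=rewrite | github.com/SeequentEvo/evo-data-converters | packages/geosoft-grd/src/evo/data_converters/grd/importer/wktfactory.py | copy_compressed_wkt
-- ===== SOURCE A (Python) =====
-- def copy_compressed_wkt(wkt_str: str) -> str:
--     """
--     Copies the WKT string skipping non-essential characters (newlines and
--     spaces outside quotes)
--     """
--     result = []
--     is_between_quotes = False
--
--     for c in wkt_str:
--         if c == '\n':
--             continue
--         if c == '"':
--             is_between_quotes = not is_between_quotes
--         if not is_between_quotes and c == ' ':
--             continue
--         result.append(c)
--
--     return ''.join(result)
-- ===== SOURCE B (Python) =====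
-- def copy_compressed_wkt(wkt_str: str) -> str:
--     """
--     Copies the WKT string skipping non-essential characters (newlines and
--     spaces outside quotes)
--     """
--     segments = wkt_str.split('"')
--     cleaned = [seg.replace('\n', '').replace(' ', '') if i % 2 == 0
--                else seg.replace('\n', '')
--                for i, seg in enumerate(segments)]
--     return '"'.join(cleaned)
-- ===== Notes on version B (the rewrite author's own statement) =====
-- stated objective: simpler
-- what changed: Replaces the character-by-character loop with an explicit is_between_quotes state flag by splitting the string on '"', stripping newlines and (for even-indexed, outside-quotes segments) spaces per segment, and rejoining with '"'.
import Mathlib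
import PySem

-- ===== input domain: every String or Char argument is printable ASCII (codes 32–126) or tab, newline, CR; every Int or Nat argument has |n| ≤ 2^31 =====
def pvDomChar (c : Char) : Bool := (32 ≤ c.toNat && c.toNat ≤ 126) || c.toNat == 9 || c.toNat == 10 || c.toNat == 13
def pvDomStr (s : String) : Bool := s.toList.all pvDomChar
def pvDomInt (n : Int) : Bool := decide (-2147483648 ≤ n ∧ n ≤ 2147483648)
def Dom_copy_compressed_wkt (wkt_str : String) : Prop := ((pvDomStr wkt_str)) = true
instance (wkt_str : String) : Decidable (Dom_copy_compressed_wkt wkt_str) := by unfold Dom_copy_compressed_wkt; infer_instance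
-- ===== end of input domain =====

-- B replaces A's character loop with a quote-state flag by split-on-'"' / clean each segment by parity / rejoin (simpler decomposition, same output).

-- ===== PORT A =====
-- A's loop body: skip '\n', toggle the flag on '"', skip ' ' outside quotes, else append
def stepA (st : List Char × Bool) (c : Char) : List Char × Bool :=
  if c = '\n' then st
  else
    let q := if c = '"' then !st.2 else st.2
    if !q && c = ' ' then (st.1, q)
    else (st.1 ++ [c], q)

def copy_compressed_wkt (wkt_str : String) : String :=
  let st := wkt_str.toList.foldl stepA ([], false)
  String.mk st.1

-- ===== PORT B =====
-- literal port of Source B: split on '"', clean each segment by parity of its index, rejoin with '"'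
def copy_compressed_wkt_alt (wkt_str : String) : String :=
  let segments := PySem.Chars.splitOn wkt_str.toList ['"']
  let cleaned := (PySem.List.enumerate segments).map
    (fun p => if PySem.Int.mod p.1 2 = 0
      then PySem.Chars.replace (PySem.Chars.replace p.2 ['\n'] []) [' '] []
      else PySem.Chars.replace p.2 ['\n'] [])
  String.mk (PySem.Chars.join ['"'] cleaned)

-- ===== PRECONDITION & SPEC =====
def Spec_copy_compressed_wkt (wkt_str : String) (out : String) : Prop := out = copy_compressed_wkt_alt wkt_str
instance (wkt_str : String) (out : String) : Decidable (Spec_copy_compressed_wkt wkt_str out) := by unfold Spec_copy_compressed_wkt; infer_instance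

-- ===== CLAIM (what is proved, stated in full; the proofs are below) =====
def Claim_equal_copy_compressed_wkt : Prop := ∀ (wkt_str : String), Dom_copy_compressed_wkt wkt_str → Spec_copy_compressed_wkt wkt_str (copy_compressed_wkt wkt_str)

-- ===== LEMMAS AND PROOFS =====

-- A's loop as structural recursion (no accumulator)
def goA : Bool → List Char → List Char
  | _, [] => []
  | q, c :: cs =>
    if c = '\n' then goA q cs
    else if c = '"' then c :: goA (!q) cs
    else if !q && c = ' ' then goA q cs
    else c :: goA q cs

lemma foldA_eq_goA (l : List Char) : ∀ (acc : List Char) (q : Bool),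
    (l.foldl stepA (acc, q)).1 = acc ++ goA q l := by
  induction l with
  | nil => intro acc q; simp [goA]
  | cons c cs ih =>
    intro acc q
    rw [List.foldl_cons]
    by_cases h1 : c = '\n'
    · have hs : stepA (acc, q) c = (acc, q) := by simp [stepA, h1]
      rw [hs, ih]
      simp [goA, h1]
    · by_cases h2 : c = '"'
      · subst h2
        have hs : stepA (acc, q) '"' = (acc ++ ['"'], !q) := by
          simp [stepA, h1]
        rw [hs, ih]
        simp [goA, h1]
      · by_cases h3 : (!q && decide (c = ' ')) = true
        · have hs : stepA (acc, q) c = (acc, q) := by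
            simp only [stepA, if_neg h1, if_neg h2]
            simp [h3]
          rw [hs, ih]
          simp only [goA, if_neg h1, if_neg h2, if_pos h3]
        · have hs : stepA (acc, q) c = (acc ++ [c], q) := by
            simp only [stepA, if_neg h1, if_neg h2]
            simp [h3]
          rw [hs, ih]
          simp only [goA, if_neg h1, if_neg h2, if_neg h3]
          simp

-- simple split-on-'"' (always returns a nonempty list of segments)
def splitQ : List Char → List (List Char)
  | [] => [[]]
  | c :: cs =>
    if c = '"' then [] :: splitQ cs
    else (c :: (splitQ cs).headI) :: (splitQ cs).tail

lemma splitQ_eq_cons (l : List Char) : splitQ l = (splitQ l).headI :: (splitQ l).tail := by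
  cases l with
  | nil => rfl
  | cons c cs =>
    simp only [splitQ]
    split_ifs <;> rfl

lemma splitOn_go_eq : ∀ (fuel : Nat) (l cur : List Char) (accs : List (List Char)),
    l.length ≤ fuel →
    PySem.Chars.splitOn.go ['"'] fuel l cur accs =
      accs.reverse ++ (cur.reverse ++ (splitQ l).headI) :: (splitQ l).tail := by
  intro fuel
  induction fuel with
  | zero =>
    intro l cur accs h
    have : l = [] := List.length_eq_zero_iff.mp (Nat.le_zero.mp h)
    subst this
    simp [PySem.Chars.splitOn.go, splitQ]
  | succ f ih =>
    intro l cur accs h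
    cases l with
    | nil => simp [PySem.Chars.splitOn.go, splitQ]
    | cons c rest =>
      by_cases hc : c = '"'
      · subst hc
        have hpre : (['"'].isPrefixOf ('"' :: rest)) = true := by simp [List.isPrefixOf]
        rw [PySem.Chars.splitOn.go]
        simp only [hpre, if_pos]
        have hdrop : List.drop (['"'].length) ('"' :: rest) = rest := rfl
        rw [hdrop]
        rw [ih rest [] (cur.reverse :: accs) (by simpa using Nat.lt_succ_iff.mp (by simpa using h))]
        rw [show splitQ ('"' :: rest) = [] :: splitQ rest from by simp [splitQ]]
        rw [splitQ_eq_cons rest]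
        simp
      · have hpre : (['"'].isPrefixOf (c :: rest)) = false := by
          simp [List.isPrefixOf]
          exact fun hh => hc hh.symm
        rw [PySem.Chars.splitOn.go]
        simp only [hpre, Bool.false_eq_true, if_false]
        rw [ih rest (c :: cur) accs (by simpa using Nat.lt_succ_iff.mp (by simpa using h))]
        rw [show splitQ (c :: rest) = (c :: (splitQ rest).headI) :: (splitQ rest).tail from by
          simp [splitQ, hc]]
        simp

lemma splitOn_quote (l : List Char) : PySem.Chars.splitOn l ['"'] = splitQ l := by
  unfold PySem.Chars.splitOn
  rw [splitOn_go_eq (l.length + 1) l [] [] (Nat.le_succ _)]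
  simp [← splitQ_eq_cons]

-- B's replace with a one-char pattern and empty replacement is a filter
lemma replace_go_eq (c : Char) : ∀ (fuel : Nat) (l acc : List Char),
    l.length ≤ fuel →
    PySem.Chars.replace.go [c] [] fuel l acc = acc.reverse ++ l.filter (· ≠ c) := by
  intro fuel
  induction fuel with
  | zero =>
    intro l acc h
    have : l = [] := List.length_eq_zero_iff.mp (Nat.le_zero.mp h)
    subst this
    simp [PySem.Chars.replace.go]
  | succ f ih =>
    intro l acc h
    cases l with
    | nil => simp [PySem.Chars.replace.go]
    | cons c' rest =>
      by_cases hc : c' = c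
      · subst hc
        have hpre : ([c'].isPrefixOf (c' :: rest)) = true := by simp [List.isPrefixOf]
        rw [PySem.Chars.replace.go]
        simp only [hpre, if_pos]
        have hdrop : List.drop ([c'].length) (c' :: rest) = rest := rfl
        rw [hdrop]
        rw [show ([] : List Char).reverse ++ acc = acc from by simp]
        rw [ih rest acc (by simpa using Nat.lt_succ_iff.mp (by simpa using h))]
        simp
      · have hpre : ([c].isPrefixOf (c' :: rest)) = false := by
          simp [List.isPrefixOf]
          exact fun hh => hc hh.symm
        rw [PySem.Chars.replace.go]
        simp only [hpre, Bool.false_eq_true, if_false]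
        rw [ih rest (c' :: acc) (by simpa using Nat.lt_succ_iff.mp (by simpa using h))]
        simp [hc]

lemma replace_single (l : List Char) (c : Char) :
    PySem.Chars.replace l [c] [] = l.filter (· ≠ c) := by
  unfold PySem.Chars.replace
  simp only [List.isEmpty_cons, Bool.false_eq_true, if_false]
  exact replace_go_eq c l.length l [] (Nat.le_refl _)

-- alternate cleaning over the segment list; q = this segment is inside quotes
def altClean : Bool → List (List Char) → List (List Char)
  | _, [] => []
  | q, s :: ss =>
    (if q then s.filter (· ≠ '\n') else (s.filter (· ≠ '\n')).filter (· ≠ ' ')) :: altClean (!q) ss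

lemma enum_map_parity (segs : List (List Char)) : ∀ (n : Nat),
    (PySem.List.enumerate segs (n : Int)).map
      (fun p => if PySem.Int.mod p.1 2 = 0
        then PySem.Chars.replace (PySem.Chars.replace p.2 ['\n'] []) [' '] []
        else PySem.Chars.replace p.2 ['\n'] [])
    = altClean (decide (n % 2 = 1)) segs := by
  induction segs with
  | nil => intro n; simp [PySem.List.enumerate_nil, altClean]
  | cons s ss ih =>
    intro n
    rw [PySem.List.enumerate_cons]
    rw [List.map_cons]
    have hcast : ((n : Int) + 1) = ((n + 1 : Nat) : Int) := by push_cast; ring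
    rw [hcast, ih (n + 1)]
    have hmod : PySem.Int.mod (n : Int) 2 = ((n % 2 : Nat) : Int) := by
      simp [PySem.Int.mod_natCast]
    rcases Nat.mod_two_eq_zero_or_one n with h | h
    · have h1 : (n + 1) % 2 = 1 := by omega
      simp only [altClean, hmod, h, h1, replace_single]
      norm_num
    · have h1 : (n + 1) % 2 = 0 := by omega
      simp only [altClean, hmod, h, h1, replace_single]
      norm_num

lemma inter_one (x : List Char) : List.intercalate ['"'] [x] = x := by
  simp [List.intercalate]

lemma inter_two (x y : List Char) (zs : List (List Char)) :
    List.intercalate ['"'] (x :: y :: zs) = x ++ '"' :: List.intercalate ['"'] (y :: zs) := by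
  simp [List.intercalate, List.intersperse]

lemma cons_intercalate (c : Char) (x : List Char) (zs : List (List Char)) :
    c :: List.intercalate ['"'] (x :: zs) = List.intercalate ['"'] ((c :: x) :: zs) := by
  cases zs with
  | nil => simp [inter_one]
  | cons y t => rw [inter_two, inter_two]; simp

lemma main_eq (l : List Char) : ∀ (q : Bool),
    goA q l = List.intercalate ['"'] (altClean q (splitQ l)) := by
  induction l with
  | nil =>
    intro q
    cases q <;> simp [goA, splitQ, altClean, inter_one]
  | cons c cs ih =>
    intro q
    by_cases h2 : c = '"'
    · subst h2
      rw [show splitQ ('"' :: cs) = [] :: splitQ cs from by simp [splitQ]]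
      rw [splitQ_eq_cons cs]
      rw [show altClean q ([] :: (splitQ cs).headI :: (splitQ cs).tail)
            = [] :: altClean (!q) ((splitQ cs).headI :: (splitQ cs).tail) from by
        cases q <;> simp [altClean]]
      rw [show altClean (!q) ((splitQ cs).headI :: (splitQ cs).tail)
            = (if !q then (splitQ cs).headI.filter (· ≠ '\n')
               else ((splitQ cs).headI.filter (· ≠ '\n')).filter (· ≠ ' '))
              :: altClean (!(!q)) (splitQ cs).tail from by simp [altClean]]
      rw [inter_two]
      rw [show (if !q then (splitQ cs).headI.filter (· ≠ '\n')
               else ((splitQ cs).headI.filter (· ≠ '\n')).filter (· ≠ ' '))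
              :: altClean (!(!q)) (splitQ cs).tail
            = altClean (!q) (splitQ cs) from by
        rw [splitQ_eq_cons cs]; simp [altClean]]
      rw [← ih (!q)]
      simp [goA]
    · rw [show splitQ (c :: cs) = (c :: (splitQ cs).headI) :: (splitQ cs).tail from by
        simp [splitQ, h2]]
      by_cases h1 : c = '\n'
      · subst h1
        have hgoal : goA q ('\n' :: cs) = goA q cs := by simp [goA]
        rw [hgoal, ih q, splitQ_eq_cons cs]
        cases q <;> simp [altClean]
      · by_cases hq : q
        · -- inside quotes: keep c (it is not '\n')
          subst hq
          have hgoal : goA true (c :: cs) = c :: goA true cs := by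
            simp [goA, h1, h2]
          rw [hgoal, ih true]
          rw [show altClean true ((c :: (splitQ cs).headI) :: (splitQ cs).tail)
                = (c :: (splitQ cs).headI.filter (· ≠ '\n')) :: altClean false (splitQ cs).tail from by
              simp [altClean, List.filter_cons, h1]]
          rw [← cons_intercalate]
          have hre : (splitQ cs).headI.filter (· ≠ '\n') :: altClean false (splitQ cs).tail
              = altClean true (splitQ cs) := by
            conv_rhs => rw [splitQ_eq_cons cs]
            simp [altClean]
          rw [hre]
        · simp only [Bool.not_eq_true] at hq
          subst hq
          by_cases h3 : c = ' '
          · subst h3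
            have hgoal : goA false (' ' :: cs) = goA false cs := by
              simp [goA, h1, h2]
            rw [hgoal, ih false, splitQ_eq_cons cs]
            simp [altClean, List.filter_cons, h1]
          · have hgoal : goA false (c :: cs) = c :: goA false cs := by
              simp [goA, h1, h2, h3]
            rw [hgoal, ih false]
            rw [show altClean false ((c :: (splitQ cs).headI) :: (splitQ cs).tail)
                  = (c :: ((splitQ cs).headI.filter (· ≠ '\n')).filter (· ≠ ' '))
                    :: altClean true (splitQ cs).tail from by
                simp [altClean, List.filter_cons, h1, h3]]
            rw [← cons_intercalate]
            have hre : ((splitQ cs).headI.filter (· ≠ '\n')).filter (· ≠ ' ')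
                  :: altClean true (splitQ cs).tail
                = altClean false (splitQ cs) := by
              conv_rhs => rw [splitQ_eq_cons cs]
              simp [altClean]
            rw [hre]

-- ===== VERDICT (by name: the statement is the Claim_ definition above) =====
theorem copy_compressed_wkt_spec : Claim_equal_copy_compressed_wkt := by
  intro s _
  unfold Spec_copy_compressed_wkt copy_compressed_wkt copy_compressed_wkt_alt
  simp only []
  rw [foldA_eq_goA s.toList [] false]
  rw [splitOn_quote]
  rw [show PySem.List.enumerate (splitQ s.toList) = PySem.List.enumerate (splitQ s.toList) ((0 : Nat) : Int) from by norm_num]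
  rw [enum_map_parity (splitQ s.toList) 0]
  rw [show PySem.Chars.join ['"'] (altClean (decide (0 % 2 = 1)) (splitQ s.toList))
        = List.intercalate ['"'] (altClean false (splitQ s.toList)) from by
    simp [PySem.Chars.join]]
  rw [main_eq s.toList false]
  simp
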